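-- pv_equiv track=rewrite | github.com/440g/BaekJoon | 프로그래머스/1/258712. 가장 많이 받은 선물/가장 많이 받은 선물.py | solution
-- ===== SOURCE A (Python) =====
-- def solution(friends, gifts):
--     #초기화
--     n = len(friends)
--     d = dict()
--     give = [[0] * n for _ in range (n)]
--     giftscore = [0] * n
--     giftpromised = [0] * n
--     for i in range (n):
--         d[friends[i]] = i
--     for i in range(len(gifts)):
--         a, b = gifts[i].split()
--         a = d[a]
--         b = d[b]
--         give[a][b] += 1
--         giftscore[a] += 1
--         giftscore[b] -= 1
--
--     # 코드
--     for i in range(n):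
--         for j in range(n):
--             if i == j:
--                 continue
--
--             if give[i][j] > give[j][i]:
--                 giftpromised[i] += 1
--             elif (give[i][j] == give[j][i]) and giftscore[i] > giftscore[j]:
--                 giftpromised[i] += 1
--
--     return max(giftpromised)
-- ===== SOURCE B (Python) =====
-- def solution(friends, gifts):
--     n = len(friends)
--     idx = {name: i for i, name in enumerate(friends)}
--     score = [0] * n
--     cnt = {}
--     for gift in gifts:
--         x, y = gift.split()
--         a, b = idx[x], idx[y]
--         cnt[(a, b)] = cnt.get((a, b), 0) + 1
--         score[a] += 1
--         score[b] -= 1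
--     # net gift balance per unordered pair, keyed (lo, hi) with lo < hi
--     net = {}
--     for (a, b), k in cnt.items():
--         if a < b:
--             net[(a, b)] = net.get((a, b), 0) + k
--         elif b < a:
--             net[(b, a)] = net.get((b, a), 0) - k
--     # rank by score: wins[i] starts as the number of strictly smaller scores
--     ss = sorted(score)
--     first = {}
--     for pos, v in enumerate(ss):
--         if v not in first:
--             first[v] = pos
--     wins = [first[score[i]] for i in range(n)]
--     # pairs with a nonzero net balance are decided by the balance, not by score
--     for (a, b), v in net.items():
--         if v != 0:
--             if score[a] > score[b]:
--                 wins[a] -= 1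
--             elif score[b] > score[a]:
--                 wins[b] -= 1
--             if v > 0:
--                 wins[a] += 1
--             else:
--                 wins[b] += 1
--     return max(wins)
-- ===== Notes on version B (the rewrite author's own statement) =====
-- stated objective: faster
-- what changed: Eliminates A's O(n^2) all-pairs comparison loop: B sorts the score vector once to give every friend a base win count (rank = number of strictly smaller scores, via a first-occurrence dict over the sorted list) and then corrects only the unordered pairs that actually exchanged gifts with a nonzero net balance, so no pair of friends is ever compared directly.
import Mathlib
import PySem

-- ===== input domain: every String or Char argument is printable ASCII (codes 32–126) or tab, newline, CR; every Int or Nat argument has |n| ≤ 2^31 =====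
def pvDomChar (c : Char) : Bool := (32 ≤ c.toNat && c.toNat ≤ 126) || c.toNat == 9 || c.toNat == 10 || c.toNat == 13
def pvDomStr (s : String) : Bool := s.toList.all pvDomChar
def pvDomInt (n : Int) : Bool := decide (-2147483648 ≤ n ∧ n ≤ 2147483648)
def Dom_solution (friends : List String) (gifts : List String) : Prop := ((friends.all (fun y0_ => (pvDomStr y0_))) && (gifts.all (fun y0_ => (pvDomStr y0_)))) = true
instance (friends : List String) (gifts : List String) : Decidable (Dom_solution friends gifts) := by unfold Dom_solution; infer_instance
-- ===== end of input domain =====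

-- B removes A's O(n^2) all-pairs comparison loop: it sorts the scores once to give each friend a
-- base win count (its rank among the scores) and then corrects only the unordered pairs that
-- actually exchanged gifts with a nonzero net balance.

-- shared helper: Python's 'lst[k] += delta' (read, add, write back; negative k wraps; out of
-- range is unreachable on the inputs Pre_ admits — Python would raise IndexError there)
def pvBump (l : List Int) (k delta : Int) : List Int :=
  match PySem.List.pyIdx? l.length k with
  | some i => l.set i (l.getD i 0 + delta)
  | none => l

-- helper for A: Python's 'give[a][b] += 1' on the matrix
def pvBump2 (m : List (List Int)) (a b : Int) : List (List Int) :=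
  match PySem.List.pyIdx? m.length a with
  | some i => m.set i (pvBump (m.getD i []) b 1)
  | none => m

-- ===== PORT A =====
def solution (friends : List String) (gifts : List String) : Int :=
  let n := PySem.List.len friends
  let d := (PySem.List.pyRange 0 n).foldl
    (fun d i => d.insert (PySem.List.pyGetD friends i "") i) (PySem.Dict.empty : PySem.Dict String Int)
  let give0 := (PySem.List.pyRange 0 n).map (fun _ => PySem.List.pyRepeat [(0 : Int)] n)
  let giftscore0 := PySem.List.pyRepeat [(0 : Int)] n
  let giftpromised0 := PySem.List.pyRepeat [(0 : Int)] n
  let st := (PySem.List.pyRange 0 (PySem.List.len gifts)).foldl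
    (fun st i =>
      let parts := PySem.Str.split₀ (PySem.List.pyGetD gifts i "")
      let a := PySem.Dict.getD d (PySem.List.pyGetD parts 0 "") 0
      let b := PySem.Dict.getD d (PySem.List.pyGetD parts 1 "") 0
      (pvBump2 st.1 a b, pvBump (pvBump st.2 a 1) b (-1)))
    (give0, giftscore0)
  let give := st.1
  let giftscore := st.2
  let giftpromised := (PySem.List.pyRange 0 n).foldl
    (fun gp i => (PySem.List.pyRange 0 n).foldl
      (fun gp j =>
        if i = j then gp
        else if PySem.List.pyGetD (PySem.List.pyGetD give i []) j 0 >
                PySem.List.pyGetD (PySem.List.pyGetD give j []) i 0 then pvBump gp i 1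
        else if PySem.List.pyGetD (PySem.List.pyGetD give i []) j 0 =
                PySem.List.pyGetD (PySem.List.pyGetD give j []) i 0 ∧
                PySem.List.pyGetD giftscore i 0 > PySem.List.pyGetD giftscore j 0 then pvBump gp i 1
        else gp) gp) giftpromised0
  ((PySem.List.max? giftpromised (fun y => y)).getD 0)

-- ===== PORT B =====
def solution_alt (friends : List String) (gifts : List String) : Int :=
  let n := PySem.List.len friends
  let idx := (PySem.List.enumerate friends).foldl
    (fun d p => d.insert p.2 p.1) (PySem.Dict.empty : PySem.Dict String Int)
  let st := gifts.foldl
    (fun st gift =>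
      let parts := PySem.Str.split₀ gift
      let a := PySem.Dict.getD idx (PySem.List.pyGetD parts 0 "") 0
      let b := PySem.Dict.getD idx (PySem.List.pyGetD parts 1 "") 0
      (st.1.insert (a, b) (st.1.getD (a, b) 0 + 1), pvBump (pvBump st.2 a 1) b (-1)))
    ((PySem.Dict.empty : PySem.Dict (Int × Int) Int), PySem.List.pyRepeat [(0 : Int)] n)
  let cnt := st.1
  let score := st.2
  let net := cnt.items.foldl
    (fun net pk =>
      if pk.1.1 < pk.1.2 then net.insert (pk.1.1, pk.1.2) (net.getD (pk.1.1, pk.1.2) 0 + pk.2)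
      else if pk.1.2 < pk.1.1 then net.insert (pk.1.2, pk.1.1) (net.getD (pk.1.2, pk.1.1) 0 - pk.2)
      else net) (PySem.Dict.empty : PySem.Dict (Int × Int) Int)
  let ss := PySem.List.sorted score (fun x => x)
  let first := (PySem.List.enumerate ss).foldl
    (fun d p => if d.contains p.2 then d else d.insert p.2 p.1)
    (PySem.Dict.empty : PySem.Dict Int Int)
  -- first[score[i]]: the key is always present (score[i] occurs in ss), so getD is exact here
  let wins := (PySem.List.pyRange 0 n).map (fun i => first.getD (PySem.List.pyGetD score i 0) 0)
  let wins2 := net.items.foldl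
    (fun w pv =>
      if pv.2 ≠ 0 then
        let w1 := if PySem.List.pyGetD score pv.1.1 0 > PySem.List.pyGetD score pv.1.2 0 then pvBump w pv.1.1 (-1)
                  else if PySem.List.pyGetD score pv.1.2 0 > PySem.List.pyGetD score pv.1.1 0 then pvBump w pv.1.2 (-1)
                  else w
        if pv.2 > 0 then pvBump w1 pv.1.1 1 else pvBump w1 pv.1.2 1
      else w) wins
  ((PySem.List.max? wins2 (fun y => y)).getD 0)

-- ===== PRECONDITION & SPEC =====
-- Pre_ excludes exactly the inputs where A raises: an empty friends list (max([]) is a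
-- ValueError) and any gift string that does not split into exactly two names both present
-- in friends (unpacking ValueError / dict KeyError).
def Pre_solution (friends : List String) (gifts : List String) : Prop :=
  friends ≠ [] ∧ ∀ g ∈ gifts,
    (PySem.Str.split₀ g).length = 2 ∧ ∀ t ∈ PySem.Str.split₀ g, t ∈ friends
instance (friends : List String) (gifts : List String) : Decidable (Pre_solution friends gifts) := by
  unfold Pre_solution; infer_instance

def pvWitness_solution : List String × List String := (["muzi", "frodo"], ["muzi frodo", "frodo muzi", "muzi frodo"])

def Spec_solution (friends : List String) (gifts : List String) (out : Int) : Prop := out = solution_alt friends gifts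
instance (friends : List String) (gifts : List String) (out : Int) : Decidable (Spec_solution friends gifts out) := by unfold Spec_solution; infer_instance

-- ===== CLAIM (what is proved, stated in full; the proofs are below) =====
def Claim_equal_solution : Prop := ∀ (friends : List String) (gifts : List String), Dom_solution friends gifts → Pre_solution friends gifts → Spec_solution friends gifts (solution friends gifts)

-- ===== LEMMAS AND PROOFS =====


-- the (giver index, receiver index) pair a gift string denotes under index dictionary d
def pvKey (d : PySem.Dict String Int) (g : String) : Int × Int :=
  (d.getD (PySem.List.pyGetD (PySem.Str.split₀ g) 0 "") 0,
   d.getD (PySem.List.pyGetD (PySem.Str.split₀ g) 1 "") 0)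

lemma pyIdx_lt (n : Nat) (k : Int) (i : Nat) (h : PySem.List.pyIdx? n k = some i) : i < n := by
  simp [PySem.List.pyIdx?] at h
  split at h <;> split at h <;> simp_all <;> omega

lemma pyGetD_mem_or {α : Type} (xs : List α) (i : Int) (d : α) :
    PySem.List.pyGetD xs i d = d ∨ PySem.List.pyGetD xs i d ∈ xs := by
  unfold PySem.List.pyGetD PySem.List.pyGet?
  cases h : PySem.List.pyIdx? xs.length i with
  | none => simp
  | some k =>
    have := pyIdx_lt _ _ _ h
    simp [List.getElem?_eq_getElem this]

lemma pyIdx_of_range (n : Nat) (k : Int) (h0 : 0 ≤ k) (h1 : k < (n : Int)) :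
    PySem.List.pyIdx? n k = some k.toNat := by
  simp [PySem.List.pyIdx?, h0, h1]

lemma pvBump_in (l : List Int) (k delta : Int) (h0 : 0 ≤ k) (h1 : k < (l.length : Int)) :
    pvBump l k delta = l.set k.toNat (l.getD k.toNat 0 + delta) := by
  simp [pvBump, pyIdx_of_range _ _ h0 h1]

lemma pvBump_length (l : List Int) (k delta : Int) : (pvBump l k delta).length = l.length := by
  unfold pvBump; cases PySem.List.pyIdx? l.length k <;> simp

lemma pvGetD_pvBump (w : List Int) (a delta k : Int) (ha0 : 0 ≤ a) (ha : a < (w.length : Int))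
    (hk0 : 0 ≤ k) (hk : k < (w.length : Int)) :
    PySem.List.pyGetD (pvBump w a delta) k 0
    = PySem.List.pyGetD w k 0 + (if k = a then delta else 0) := by
  rw [pvBump_in _ _ _ ha0 ha, PySem.List.pyGetD_of_nonneg _ _ hk0, PySem.List.pyGetD_of_nonneg _ _ hk0]
  by_cases h : k = a
  · subst h
    have : k.toNat < w.length := by omega
    simp [List.getD_eq_getElem?_getD, this]
  · have hne : a.toNat ≠ k.toNat := by omega
    rw [List.getD_eq_getElem?_getD, List.getD_eq_getElem?_getD, List.getElem?_set_ne hne]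
    simp [h]

def pvEntry (m : List (List Int)) (i j : Int) : Int :=
  PySem.List.pyGetD (PySem.List.pyGetD m i []) j 0

def pvShape (m : List (List Int)) (n : Nat) : Prop :=
  m.length = n ∧ ∀ r ∈ m, r.length = n

lemma pvBump2_shape (m : List (List Int)) (n : Nat) (h : pvShape m n) (a b : Int) :
    pvShape (pvBump2 m a b) n := by
  obtain ⟨h1, h2⟩ := h
  unfold pvBump2
  cases ha : PySem.List.pyIdx? m.length a with
  | none => exact ⟨h1, h2⟩
  | some ia =>
    have hia := pyIdx_lt _ _ _ ha
    refine ⟨by simp [h1], ?_⟩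
    intro r hr
    rcases List.mem_or_eq_of_mem_set hr with hmem | rfl
    · exact h2 _ hmem
    · rw [pvBump_length]
      exact h2 _ (by rw [List.getD_eq_getElem?_getD, List.getElem?_eq_getElem hia]; exact List.getElem_mem hia)

lemma pvEntry_in (m : List (List Int)) (i j : Int) (hi0 : 0 ≤ i) (hj0 : 0 ≤ j) :
    pvEntry m i j = (m.getD i.toNat []).getD j.toNat 0 := by
  unfold pvEntry
  rw [PySem.List.pyGetD_of_nonneg _ _ hi0, PySem.List.pyGetD_of_nonneg _ _ hj0]

lemma pvBump2_in (m : List (List Int)) (a b : Int) (h0 : 0 ≤ a) (h1 : a < (m.length : Int)) :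
    pvBump2 m a b = m.set a.toNat (pvBump (m.getD a.toNat []) b 1) := by
  simp [pvBump2, pyIdx_of_range _ _ h0 h1]

lemma pvEntry_bump2 (m : List (List Int)) (n : Nat) (h : pvShape m n) (a b i j : Int)
    (ha : 0 ≤ a ∧ a < (n : Int)) (hb : 0 ≤ b ∧ b < (n : Int))
    (hi : 0 ≤ i ∧ i < (n : Int)) (hj : 0 ≤ j ∧ j < (n : Int)) :
    pvEntry (pvBump2 m a b) i j = pvEntry m i j + (if (i, j) = (a, b) then 1 else 0) := by
  obtain ⟨h1, h2⟩ := h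
  have haN : a.toNat < m.length := by omega
  have rowmem : m.getD a.toNat [] ∈ m := by
    rw [List.getD_eq_getElem?_getD, List.getElem?_eq_getElem haN]; exact List.getElem_mem haN
  have hrowlen : (m.getD a.toNat []).length = n := h2 _ rowmem
  have hbrow : b < ((m.getD a.toNat []).length : Int) := by rw [hrowlen]; exact hb.2
  rw [pvBump2_in _ _ b ha.1 (by rw [h1]; exact ha.2),
    pvBump_in _ _ _ hb.1 hbrow,
    pvEntry_in _ _ _ hi.1 hj.1, pvEntry_in _ _ _ hi.1 hj.1]
  by_cases hiaeq : i = a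
  · subst hiaeq
    rw [List.getD_eq_getElem?_getD (l := m.set _ _), List.getElem?_set]
    simp only [haN, if_pos]
    by_cases hjb : j = b
    · subst hjb
      have hjN : j.toNat < (m.getD i.toNat []).length := by omega
      rw [List.getD_eq_getElem?_getD] at hjN
      simp [List.getD_eq_getElem?_getD, hjN]
    · have hjb' : j.toNat ≠ b.toNat := by omega
      have : ((i, j) : Int × Int) ≠ (i, b) := by simp [hjb]
      simp [List.getD_eq_getElem?_getD, Ne.symm hjb', this]
  · have hia' : i.toNat ≠ a.toNat := by omega
    have : ((i, j) : Int × Int) ≠ (a, b) := by simp [hiaeq]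
    simp [List.getD_eq_getElem?_getD, Ne.symm hia', this]

lemma pvMatCount (n : Nat) (P : List (Int × Int))
    (hP : ∀ p ∈ P, (0 ≤ p.1 ∧ p.1 < (n : Int)) ∧ (0 ≤ p.2 ∧ p.2 < (n : Int))) :
    ∀ (m : List (List Int)), pvShape m n → ∀ i j, (0 ≤ i ∧ i < (n : Int)) → (0 ≤ j ∧ j < (n : Int)) →
    pvEntry (P.foldl (fun m p => pvBump2 m p.1 p.2) m) i j = pvEntry m i j + (P.count (i, j) : Int) := by
  induction P with
  | nil => intro m _ i j _ _; simp
  | cons p P ih =>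
    intro m hm i j hi hj
    have hp := hP p List.mem_cons_self
    simp only [List.foldl_cons]
    rw [ih (fun q hq => hP q (List.mem_cons_of_mem _ hq)) _ (pvBump2_shape _ _ hm _ _) i j hi hj,
      pvEntry_bump2 m n hm p.1 p.2 i j hp.1 hp.2 hi hj, List.count_cons]
    by_cases hpij : ((i, j) : Int × Int) = (p.1, p.2)
    · have hp' : p = (i, j) := by rcases p with ⟨p1, p2⟩; simp_all
      rw [if_pos hpij, if_pos (by simp [hp'])]
      push_cast
      ring
    · have hne : p ≠ (i, j) := by
        rcases p with ⟨p1, p2⟩; exact fun h => hpij (by simp at h; simp [h.1, h.2])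
      rw [if_neg hpij, if_neg (by simp [hne])]
      push_cast
      ring

def pvGive0 (n : Nat) : List (List Int) :=
  (PySem.List.pyRange 0 (n : Int)).map (fun _ => PySem.List.pyRepeat [(0 : Int)] (n : Int))

def pvMatOf (n : Nat) (P : List (Int × Int)) : List (List Int) :=
  P.foldl (fun m p => pvBump2 m p.1 p.2) (pvGive0 n)

lemma pvEntry_zero (n : Nat) (i j : Int) :
    pvEntry ((PySem.List.pyRange 0 (n : Int)).map (fun _ => PySem.List.pyRepeat [(0 : Int)] (n : Int))) i j = 0 := by
  unfold pvEntry
  rcases pyGetD_mem_or ((PySem.List.pyRange 0 (n : Int)).map (fun _ => PySem.List.pyRepeat [(0 : Int)] (n : Int))) i [] with h | h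
  · rw [h]
    simp only [PySem.List.pyGetD, PySem.List.pyGet?]
    cases PySem.List.pyIdx? ([] : List Int).length j <;> simp
  · rw [List.mem_map] at h
    obtain ⟨_, _, hrow⟩ := h
    rw [← hrow]
    rcases pyGetD_mem_or (PySem.List.pyRepeat [(0 : Int)] (n : Int)) j 0 with h2 | h2
    · rw [h2]
    · rw [PySem.List.pyRepeat_singleton] at h2 ⊢
      exact List.eq_of_mem_replicate h2

lemma pvDictP (L : List Int) (f : Int → String) (P : Int → Prop)
    (hL : ∀ i ∈ L, P i) :
    ∀ (d0 : PySem.Dict String Int), (∀ k, P (d0.getD k 0)) →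
    ∀ k, P ((L.foldl (fun d i => d.insert (f i) i) d0).getD k 0) := by
  induction L with
  | nil => intro d0 h0 k; exact h0 k
  | cons x L ih =>
    intro d0 h0 k
    simp only [List.foldl_cons]
    refine ih (fun i hi => hL i (List.mem_cons_of_mem _ hi)) _ (fun k' => ?_) k
    rw [PySem.Dict.getD_insert]
    split
    · exact hL x List.mem_cons_self
    · exact h0 k'

lemma pvIdx_val (friends : List String) (h : friends ≠ []) (k : String) :
    0 ≤ ((PySem.List.pyRange 0 (PySem.List.len friends)).foldl
      (fun d i => d.insert (PySem.List.pyGetD friends i "") i)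
      (PySem.Dict.empty : PySem.Dict String Int)).getD k 0 ∧
    ((PySem.List.pyRange 0 (PySem.List.len friends)).foldl
      (fun d i => d.insert (PySem.List.pyGetD friends i "") i)
      (PySem.Dict.empty : PySem.Dict String Int)).getD k 0 < (friends.length : Int) := by
  have hn : 0 < friends.length := List.length_pos_iff.mpr h
  refine pvDictP _ _ (fun v => 0 ≤ v ∧ v < (friends.length : Int)) ?_ _ ?_ k
  · intro i hi
    rw [PySem.List.mem_pyRange_one] at hi
    simpa [PySem.List.len_eq] using hi
  · intro k'
    rw [PySem.Dict.getD_empty]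
    constructor <;> [rfl; exact_mod_cast hn]

-- A builds the name→index dict by position, B by enumerate: the same dict
lemma pvIdx_eq (friends : List String) :
    (PySem.List.enumerate friends).foldl (fun d p => d.insert p.2 p.1)
      (PySem.Dict.empty : PySem.Dict String Int)
    = (PySem.List.pyRange 0 (PySem.List.len friends)).foldl
      (fun d i => d.insert (PySem.List.pyGetD friends i "") i) PySem.Dict.empty := by
  rw [PySem.List.enumerate_eq_map_pyRange friends "", List.foldl_map]



-- ---- abstract quantities both programs compute, over the list K of (giver, receiver) index pairs
def pvC (K : List (Int × Int)) (i j : Int) : Int := (K.count (i, j) : Int)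
def pvSG (s : List Int) (i : Int) : Int := PySem.List.pyGetD s i 0

-- winner predicate of A's ordered comparison (row i against column j)
abbrev pvW (K : List (Int × Int)) (s : List Int) (i j : Int) : Prop :=
  j ≠ i ∧ (pvC K i j > pvC K j i ∨ (pvC K i j = pvC K j i ∧ pvSG s i > pvSG s j))

def pvRowA (K : List (Int × Int)) (s : List Int) (n : Nat) (i : Int) : Int :=
  ((PySem.List.pyRange 0 (n : Int)).map (fun j => if pvW K s i j then (1 : Int) else 0)).sum

def pvLtCnt (s : List Int) (n : Nat) (k : Int) : Int :=
  ((PySem.List.pyRange 0 (n : Int)).map (fun j => if pvSG s j < pvSG s k then (1 : Int) else 0)).sum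

-- per-item contribution of B's correction loop to position k
def pvDelta (K : List (Int × Int)) (s : List Int) (k : Int) (x : Int × Int) : Int :=
  if pvC K x.1 x.2 - pvC K x.2 x.1 ≠ 0 then
    (if pvSG s x.1 > pvSG s x.2 then (if k = x.1 then -1 else 0)
     else if pvSG s x.2 > pvSG s x.1 then (if k = x.2 then -1 else 0) else 0)
    + (if pvC K x.1 x.2 - pvC K x.2 x.1 > 0 then (if k = x.1 then 1 else 0)
       else (if k = x.2 then 1 else 0))
  else 0

-- ---- generic lemmas about folds of in-place updates over an Int list
lemma pvFoldLen {α : Type} (step : List Int → α → List Int)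
    (hlen : ∀ w x, (step w x).length = w.length) :
    ∀ (L : List α) (w : List Int), (L.foldl step w).length = w.length := by
  intro L
  induction L with
  | nil => intro w; rfl
  | cons x L ih => intro w; simp only [List.foldl_cons]; rw [ih, hlen]

lemma pvFoldGetD {α : Type} (n : Nat) (step : List Int → α → List Int) (D : α → Int → Int) :
    ∀ (L : List α),
    (∀ w x, (step w x).length = w.length) →
    (∀ w x k, x ∈ L → w.length = n → 0 ≤ k → k < (n : Int) →
      PySem.List.pyGetD (step w x) k 0 = PySem.List.pyGetD w k 0 + D x k) →
    ∀ (w : List Int), w.length = n → ∀ k, 0 ≤ k → k < (n : Int) →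
    PySem.List.pyGetD (L.foldl step w) k 0
      = PySem.List.pyGetD w k 0 + (L.map (fun x => D x k)).sum := by
  intro L
  induction L with
  | nil => intro _ _ w _ k _ _; simp
  | cons x L ih =>
    intro hlen hget w hw k hk0 hk
    simp only [List.foldl_cons, List.map_cons, List.sum_cons]
    rw [ih hlen (fun w x k hx => hget w x k (List.mem_cons_of_mem _ hx)) (step w x)
        (by rw [hlen, hw]) k hk0 hk,
      hget w x k List.mem_cons_self hw hk0 hk]
    ring

-- A's inner loop over j only ever increments position i
lemma pvInnerGetD (C : Int → Prop) [DecidablePred C] (i : Int) (L : List Int) :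
    ∀ (gp : List Int), 0 ≤ i → i < (gp.length : Int) → ∀ k, 0 ≤ k → k < (gp.length : Int) →
    PySem.List.pyGetD (L.foldl (fun gp j => if C j then pvBump gp i 1 else gp) gp) k 0
    = PySem.List.pyGetD gp k 0
      + (if k = i then ((L.map (fun j => if C j then (1 : Int) else 0)).sum) else 0) := by
  induction L with
  | nil => intro gp _ _ k _ _; simp
  | cons j L ih =>
    intro gp hi0 hi k hk0 hk
    simp only [List.foldl_cons, List.map_cons, List.sum_cons]
    by_cases hC : C j
    · rw [if_pos hC,
        ih (pvBump gp i 1) hi0 (by rw [pvBump_length]; exact hi) k hk0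
          (by rw [pvBump_length]; exact hk),
        pvGetD_pvBump gp i 1 k hi0 hi hk0 hk]
      by_cases hki : k = i
      · simp [hki, hC]
        ring
      · simp [hki]
    · rw [if_neg hC, ih gp hi0 hi k hk0 hk]
      simp [hC]

-- ---- sums
lemma pv_sum_sub {α : Type} (l : List α) (f g : α → Int) :
    (l.map (fun x => f x - g x)).sum = (l.map f).sum - (l.map g).sum := by
  induction l with
  | nil => simp
  | cons x l ih => simp only [List.map_cons, List.sum_cons, ih]; ring

lemma pv_sum_drop_zero {α : Type} (l : List α) (f : α → Int) (p : α → Bool)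
    (h : ∀ x ∈ l, p x = false → f x = 0) :
    (l.map f).sum = ((l.filter p).map f).sum := by
  induction l with
  | nil => simp
  | cons x l ih =>
    have ih' := ih (fun y hy => h y (List.mem_cons_of_mem _ hy))
    by_cases hp : p x
    · simp [hp, ih']
    · simp only [Bool.not_eq_true] at hp
      simp [hp, ih', h x List.mem_cons_self hp]



-- ---- the first-occurrence dict over the sorted score list
lemma pvFirst_contains (L : List Int) :
    ∀ (s0 : Int) (d : PySem.Dict Int Int) (v : Int), d.contains v = true →
    ((PySem.List.enumerate L s0).foldl
      (fun d p => if d.contains p.2 then d else d.insert p.2 p.1) d).getD v 0 = d.getD v 0 := by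
  induction L with
  | nil => intro s0 d v _; simp [PySem.List.enumerate_nil]
  | cons x L ih =>
    intro s0 d v hv
    rw [PySem.List.enumerate_cons, List.foldl_cons]
    by_cases hx : d.contains x
    · rw [if_pos hx]; exact ih _ _ _ hv
    · rw [if_neg hx]
      have hxv : v ≠ x := fun h => hx (h ▸ hv)
      rw [ih _ _ _ (by rw [PySem.Dict.contains_insert]; simp [hv]),
        PySem.Dict.getD_insert, if_neg hxv]

lemma pvFirst_getD (L : List Int) :
    ∀ (s0 : Int) (d : PySem.Dict Int Int) (v : Int), L.Pairwise (· ≤ ·) → v ∈ L →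
    d.contains v = false →
    ((PySem.List.enumerate L s0).foldl
      (fun d p => if d.contains p.2 then d else d.insert p.2 p.1) d).getD v 0
    = s0 + (L.countP (fun w => decide (w < v)) : Int) := by
  induction L with
  | nil => intro _ _ _ _ hv _; cases hv
  | cons x L ih =>
    intro s0 d v hpw hv hdv
    rw [PySem.List.enumerate_cons, List.foldl_cons]
    rw [List.pairwise_cons] at hpw
    by_cases hxv : x = v
    · subst hxv
      rw [if_neg (by simp [hdv])]
      have hcnt : L.countP (fun w => decide (w < x)) = 0 := by
        rw [List.countP_eq_zero]
        intro w hw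
        have := hpw.1 w hw
        simp; omega
      have : (L.countP (fun w => decide (w < x)) : Int) = 0 := by rw [hcnt]; rfl
      rw [pvFirst_contains _ _ _ _ (PySem.Dict.contains_insert_self _ _ _),
        PySem.Dict.getD_insert_self, List.countP_cons]
      simp [this]
    · have hvL : v ∈ L := by
        rcases List.mem_cons.mp hv with h | h
        · exact absurd h.symm hxv
        · exact h
      have hxltv : x < v := lt_of_le_of_ne (hpw.1 v hvL) hxv
      have hcnt : (x :: L).countP (fun w => decide (w < v))
          = L.countP (fun w => decide (w < v)) + 1 := by
        rw [List.countP_cons]; simp [hxltv]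
      by_cases hx : d.contains x
      · rw [if_pos hx, ih _ _ _ hpw.2 hvL hdv, hcnt]; push_cast; ring
      · rw [if_neg hx,
          ih _ _ _ hpw.2 hvL (by rw [PySem.Dict.contains_insert]; simp [hdv]; omega),
          hcnt]
        push_cast; ring

-- ---- the net-balance dict, built from the distinct directed pairs Q with values c q
lemma pvNet_nodup_keys (c : Int × Int → Int) (Q : List (Int × Int)) :
    ∀ (d : PySem.Dict (Int × Int) Int), d.keys.Nodup →
    (Q.foldl (fun net q =>
      if q.1 < q.2 then net.insert (q.1, q.2) (net.getD (q.1, q.2) 0 + c q)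
      else if q.2 < q.1 then net.insert (q.2, q.1) (net.getD (q.2, q.1) 0 - c q)
      else net) d).keys.Nodup := by
  induction Q with
  | nil => intro d h; exact h
  | cons q Q ih =>
    intro d h
    simp only [List.foldl_cons]
    split
    · exact ih _ (PySem.Dict.nodup_keys_insert _ _ _ h)
    · split
      · exact ih _ (PySem.Dict.nodup_keys_insert _ _ _ h)
      · exact ih _ h

lemma pvNet_mem_keys (c : Int × Int → Int) (Q : List (Int × Int)) :
    ∀ (d : PySem.Dict (Int × Int) Int) (x : Int × Int),
    (x ∈ (Q.foldl (fun net q =>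
      if q.1 < q.2 then net.insert (q.1, q.2) (net.getD (q.1, q.2) 0 + c q)
      else if q.2 < q.1 then net.insert (q.2, q.1) (net.getD (q.2, q.1) 0 - c q)
      else net) d).keys)
    ↔ (x ∈ d.keys ∨ (x.1 < x.2 ∧ ((x.1, x.2) ∈ Q ∨ (x.2, x.1) ∈ Q))) := by
  induction Q with
  | nil => intro d x; simp
  | cons q Q ih =>
    intro d x
    simp only [List.foldl_cons]
    rcases lt_trichotomy q.1 q.2 with h | h | h
    · rw [if_pos h, ih]
      rw [PySem.Dict.mem_keys_insert]
      constructor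
      · rintro ((rfl | hx) | hq)
        · exact Or.inr ⟨h, Or.inl (List.mem_cons_self)⟩
        · exact Or.inl hx
        · refine Or.inr ⟨hq.1, ?_⟩
          rcases hq.2 with h2 | h2
          · exact Or.inl (List.mem_cons_of_mem _ h2)
          · exact Or.inr (List.mem_cons_of_mem _ h2)
      · rintro (hx | ⟨hlt, h2 | h2⟩)
        · exact Or.inl (Or.inr hx)
        · rcases List.mem_cons.mp h2 with h3 | h3
          · exact Or.inl (Or.inl (by rw [← h3]))
          · exact Or.inr ⟨hlt, Or.inl h3⟩
        · rcases List.mem_cons.mp h2 with h3 | h3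
          · exfalso
            have e1 : x.2 = q.1 := congrArg Prod.fst h3
            have e2 : x.1 = q.2 := congrArg Prod.snd h3
            omega
          · exact Or.inr ⟨hlt, Or.inr h3⟩
    · rw [if_neg (by omega), if_neg (by omega), ih]
      constructor
      · rintro (hx | hq)
        · exact Or.inl hx
        · refine Or.inr ⟨hq.1, ?_⟩
          rcases hq.2 with h2 | h2
          · exact Or.inl (List.mem_cons_of_mem _ h2)
          · exact Or.inr (List.mem_cons_of_mem _ h2)
      · rintro (hx | ⟨hlt, h2 | h2⟩)
        · exact Or.inl hx
        · rcases List.mem_cons.mp h2 with h3 | h3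
          · exfalso
            have e1 : x.1 = q.1 := congrArg Prod.fst h3
            have e2 : x.2 = q.2 := congrArg Prod.snd h3
            omega
          · exact Or.inr ⟨hlt, Or.inl h3⟩
        · rcases List.mem_cons.mp h2 with h3 | h3
          · exfalso
            have e1 : x.2 = q.1 := congrArg Prod.fst h3
            have e2 : x.1 = q.2 := congrArg Prod.snd h3
            omega
          · exact Or.inr ⟨hlt, Or.inr h3⟩
    · rw [if_neg (by omega), if_pos h, ih]
      rw [PySem.Dict.mem_keys_insert]
      constructor
      · rintro ((rfl | hx) | hq)
        · exact Or.inr ⟨h, Or.inr (by simp)⟩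
        · exact Or.inl hx
        · refine Or.inr ⟨hq.1, ?_⟩
          rcases hq.2 with h2 | h2
          · exact Or.inl (List.mem_cons_of_mem _ h2)
          · exact Or.inr (List.mem_cons_of_mem _ h2)
      · rintro (hx | ⟨hlt, h2 | h2⟩)
        · exact Or.inl (Or.inr hx)
        · rcases List.mem_cons.mp h2 with h3 | h3
          · exfalso
            have e1 : x.1 = q.1 := congrArg Prod.fst h3
            have e2 : x.2 = q.2 := congrArg Prod.snd h3
            omega
          · exact Or.inr ⟨hlt, Or.inl h3⟩
        · rcases List.mem_cons.mp h2 with h3 | h3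
          · refine Or.inl (Or.inl ?_)
            have e1 : x.2 = q.1 := congrArg Prod.fst h3
            have e2 : x.1 = q.2 := congrArg Prod.snd h3
            cases x
            simp_all
          · exact Or.inr ⟨hlt, Or.inr h3⟩


lemma pvNet_getD (c : Int × Int → Int) (Q : List (Int × Int)) (a b : Int) (hab : a < b) :
    ∀ (d : PySem.Dict (Int × Int) Int), Q.Nodup →
    (Q.foldl (fun net q =>
      if q.1 < q.2 then net.insert (q.1, q.2) (net.getD (q.1, q.2) 0 + c q)
      else if q.2 < q.1 then net.insert (q.2, q.1) (net.getD (q.2, q.1) 0 - c q)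
      else net) d).getD (a, b) 0
    = d.getD (a, b) 0 + (if (a, b) ∈ Q then c (a, b) else 0) - (if (b, a) ∈ Q then c (b, a) else 0) := by
  induction Q with
  | nil => intro d _; simp
  | cons q Q ih =>
    intro d hnd
    rw [List.nodup_cons] at hnd
    simp only [List.foldl_cons]
    rcases lt_trichotomy q.1 q.2 with h | h | h
    · rw [if_pos h, ih _ hnd.2]
      by_cases hq : q = (a, b)
      · subst hq
        have h1 : ((a, b) : Int × Int) ∈ (a, b) :: Q := List.mem_cons_self
        have h2 : ((a, b) : Int × Int) ∉ Q := hnd.1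
        have h3 : ((b, a) : Int × Int) ∈ (a, b) :: Q ↔ ((b, a) : Int × Int) ∈ Q := by
          simp only [List.mem_cons]
          constructor
          · rintro (h4 | h4)
            · exfalso
              have e1 : b = a := congrArg Prod.fst h4
              omega
            · exact h4
          · exact Or.inr
        rw [PySem.Dict.getD_insert_self, if_pos h1, if_neg h2]
        simp only [h3]
        ring
      · have hne : ((a, b) : Int × Int) ≠ (q.1, q.2) := by
          intro h4; exact hq (by cases q; simp_all)
        rw [PySem.Dict.getD_insert, if_neg hne]
        have h3 : (((a, b) : Int × Int) ∈ q :: Q ↔ ((a, b) : Int × Int) ∈ Q) := by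
          simp only [List.mem_cons]
          constructor
          · rintro (h4 | h4)
            · exact absurd h4.symm hq
            · exact h4
          · exact Or.inr
        have h4 : (((b, a) : Int × Int) ∈ q :: Q ↔ ((b, a) : Int × Int) ∈ Q) := by
          simp only [List.mem_cons]
          constructor
          · rintro (h5 | h5)
            · exfalso
              have e1 : b = q.1 := congrArg Prod.fst h5.symm ▸ rfl
              have e2 : q.1 = b := (congrArg Prod.fst h5).symm
              have e3 : q.2 = a := (congrArg Prod.snd h5).symm
              omega
            · exact h5
          · exact Or.inr
        simp only [h3, h4]
    · rw [if_neg (by omega), if_neg (by omega), ih _ hnd.2]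
      have h3 : (((a, b) : Int × Int) ∈ q :: Q ↔ ((a, b) : Int × Int) ∈ Q) := by
        simp only [List.mem_cons]
        constructor
        · rintro (h4 | h4)
          · exfalso
            have e2 : q.1 = a := (congrArg Prod.fst h4).symm
            have e3 : q.2 = b := (congrArg Prod.snd h4).symm
            omega
          · exact h4
        · exact Or.inr
      have h4 : (((b, a) : Int × Int) ∈ q :: Q ↔ ((b, a) : Int × Int) ∈ Q) := by
        simp only [List.mem_cons]
        constructor
        · rintro (h5 | h5)
          · exfalso
            have e2 : q.1 = b := (congrArg Prod.fst h5).symm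
            have e3 : q.2 = a := (congrArg Prod.snd h5).symm
            omega
          · exact h5
        · exact Or.inr
      simp only [h3, h4]
    · rw [if_neg (by omega), if_pos h, ih _ hnd.2]
      by_cases hq : q = (b, a)
      · subst hq
        have h1 : ((b, a) : Int × Int) ∈ (b, a) :: Q := List.mem_cons_self
        have h2 : ((b, a) : Int × Int) ∉ Q := hnd.1
        have h3 : ((a, b) : Int × Int) ∈ (b, a) :: Q ↔ ((a, b) : Int × Int) ∈ Q := by
          simp only [List.mem_cons]
          constructor
          · rintro (h4 | h4)
            · exfalso
              have e1 : a = b := congrArg Prod.fst h4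
              omega
            · exact h4
          · exact Or.inr
        rw [PySem.Dict.getD_insert_self, if_pos h1, if_neg h2]
        simp only [h3]
        ring
      · have hne : ((a, b) : Int × Int) ≠ (q.2, q.1) := by
          intro h4
          have e1 : a = q.2 := congrArg Prod.fst h4
          have e2 : b = q.1 := congrArg Prod.snd h4
          exact hq (by cases q; simp_all)
        rw [PySem.Dict.getD_insert, if_neg hne]
        have h3 : (((a, b) : Int × Int) ∈ q :: Q ↔ ((a, b) : Int × Int) ∈ Q) := by
          simp only [List.mem_cons]
          constructor
          · rintro (h4 | h4)
            · exfalso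
              have e2 : q.1 = a := (congrArg Prod.fst h4).symm
              have e3 : q.2 = b := (congrArg Prod.snd h4).symm
              omega
            · exact h4
          · exact Or.inr
        have h4 : (((b, a) : Int × Int) ∈ q :: Q ↔ ((b, a) : Int × Int) ∈ Q) := by
          simp only [List.mem_cons]
          constructor
          · rintro (h5 | h5)
            · exact absurd h5.symm hq
            · exact h5
          · exact Or.inr
        simp only [h3, h4]


-- the unordered-pair key B files the pair {k, j} under
def pvPKey (k j : Int) : Int × Int := if k < j then (k, j) else (j, k)

lemma pvPKey_inj (k j1 j2 : Int) (h : pvPKey k j1 = pvPKey k j2) : j1 = j2 := by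
  unfold pvPKey at h
  split_ifs at h <;>
    (first
      | (have e1 := congrArg Prod.fst h; have e2 := congrArg Prod.snd h;
         simp only at e1 e2; omega))

lemma pvDelta_zero (K : List (Int × Int)) (s : List Int) (k : Int) (x : Int × Int)
    (h1 : k ≠ x.1) (h2 : k ≠ x.2) : pvDelta K s k x = 0 := by
  unfold pvDelta
  split_ifs <;> omega

-- summing B's corrections over the key list = summing them over the columns of A's row k
lemma pvReindex (n : Nat) (k : Int) (f : Int × Int → Int) (NK : List (Int × Int))
    (hnd : NK.Nodup)
    (hmem : ∀ x ∈ NK, x.1 < x.2 ∧ 0 ≤ x.1 ∧ x.2 < (n : Int))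
    (hf0 : ∀ x ∈ NK, k ≠ x.1 → k ≠ x.2 → f x = 0) :
    ((PySem.List.pyRange 0 (n : Int)).map
      (fun j => if pvPKey k j ∈ NK then f (pvPKey k j) else 0)).sum
    = (NK.map f).sum := by
  have hJ : (NK.map f).sum = ((NK.filter (fun x => decide (k = x.1 ∨ k = x.2))).map f).sum := by
    refine pv_sum_drop_zero _ _ _ ?_
    intro x hx hp
    simp only [decide_eq_false_iff_not, not_or] at hp
    exact hf0 x hx hp.1 hp.2
  have hL : ((PySem.List.pyRange 0 (n : Int)).map
      (fun j => if pvPKey k j ∈ NK then f (pvPKey k j) else 0)).sum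
      = (((PySem.List.pyRange 0 (n : Int)).filter (fun j => decide (pvPKey k j ∈ NK))).map
        (fun j => if pvPKey k j ∈ NK then f (pvPKey k j) else 0)).sum := by
    refine pv_sum_drop_zero _ _ _ ?_
    intro j _ hp
    simp only [decide_eq_false_iff_not] at hp
    exact if_neg hp
  rw [hL, hJ]
  have hmap : (((PySem.List.pyRange 0 (n : Int)).filter (fun j => decide (pvPKey k j ∈ NK))).map
        (fun j => if pvPKey k j ∈ NK then f (pvPKey k j) else 0))
      = (((PySem.List.pyRange 0 (n : Int)).filter (fun j => decide (pvPKey k j ∈ NK))).map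
        (fun j => f (pvPKey k j))) := by
    refine List.map_congr_left ?_
    intro j hj
    rw [List.mem_filter] at hj
    have := of_decide_eq_true hj.2
    exact if_pos this
  rw [hmap]
  have hperm : (((PySem.List.pyRange 0 (n : Int)).filter
        (fun j => decide (pvPKey k j ∈ NK))).map (pvPKey k)).Perm
      (NK.filter (fun x => decide (k = x.1 ∨ k = x.2))) := by
    have hnd1 : (((PySem.List.pyRange 0 (n : Int)).filter
        (fun j => decide (pvPKey k j ∈ NK))).map (pvPKey k)).Nodup := by
      refine List.Nodup.map_on ?_ (List.Nodup.filter _ (PySem.List.nodup_pyRange_one _ _))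
      intro j1 _ j2 _ h
      exact pvPKey_inj k j1 j2 h
    have hnd2 : (NK.filter (fun x => decide (k = x.1 ∨ k = x.2))).Nodup :=
      List.Nodup.filter _ hnd
    refine (List.perm_ext_iff_of_nodup hnd1 hnd2).mpr ?_
    intro x
    rw [List.mem_filter, List.mem_map]
    constructor
    · rintro ⟨j, hj, rfl⟩
      rw [List.mem_filter] at hj
      have hxmem := of_decide_eq_true hj.2
      refine ⟨hxmem, ?_⟩
      unfold pvPKey
      split_ifs <;> simp
    · rintro ⟨hx, hside⟩
      have hside' := of_decide_eq_true hside
      obtain ⟨hlt, h0, hn⟩ := hmem x hx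
      rcases hside' with h | h
      · refine ⟨x.2, ?_, ?_⟩
        · rw [List.mem_filter]
          constructor
          · rw [PySem.List.mem_pyRange_one]; omega
          · have : pvPKey k x.2 = x := by
              unfold pvPKey
              rw [if_pos (by omega)]
              cases x; simp_all
            rw [this]; exact decide_eq_true hx
        · unfold pvPKey
          rw [if_pos (by omega)]
          cases x; simp_all
      · refine ⟨x.1, ?_, ?_⟩
        · rw [List.mem_filter]
          constructor
          · rw [PySem.List.mem_pyRange_one]; omega
          · have : pvPKey k x.1 = x := by
              unfold pvPKey
              rw [if_neg (by omega)]
              cases x; simp_all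
            rw [this]; exact decide_eq_true hx
        · unfold pvPKey
          rw [if_neg (by omega)]
          cases x; simp_all
  have hsum := List.Perm.sum_eq (List.Perm.map f hperm)
  rw [List.map_map] at hsum
  exact hsum

-- the per-column identity: A's comparison outcome minus the score rank indicator
-- is exactly B's correction for that unordered pair
lemma pvTermwise (K : List (Int × Int)) (s : List Int) (NK : List (Int × Int))
    (hNK : ∀ x, x ∈ NK ↔ x.1 < x.2 ∧ ((x.1, x.2) ∈ K ∨ (x.2, x.1) ∈ K))
    (k j : Int) :
    (if pvW K s k j then (1 : Int) else 0) - (if pvSG s j < pvSG s k then 1 else 0)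
    = (if pvPKey k j ∈ NK then pvDelta K s k (pvPKey k j) else 0) := by
  by_cases hjk : j = k
  · subst hjk
    rw [if_neg (by unfold pvW; simp), if_neg (by omega), if_neg (by
      rw [hNK]
      unfold pvPKey
      simp)]
    ring
  · by_cases hmem : pvPKey k j ∈ NK
    · rw [if_pos hmem]
      rcases lt_or_gt_of_ne (fun h => hjk h.symm) with hkj | hkj
      · have hx : pvPKey k j = (k, j) := by unfold pvPKey; rw [if_pos hkj]
        rw [hx]
        unfold pvDelta pvW
        simp only
        split_ifs <;> omega
      · have hx : pvPKey k j = (j, k) := by unfold pvPKey; rw [if_neg (by omega)]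
        rw [hx]
        unfold pvDelta pvW
        simp only
        split_ifs <;> omega
    · rw [if_neg hmem]
      rw [hNK] at hmem
      have hord : (pvPKey k j).1 < (pvPKey k j).2 := by
        unfold pvPKey
        split_ifs <;> simp <;> omega
    -- neither direction of the pair ever occurs in K
      have hnK : ((pvPKey k j).1, (pvPKey k j).2) ∉ K ∧ ((pvPKey k j).2, (pvPKey k j).1) ∉ K :=
        ⟨fun h => hmem ⟨hord, Or.inl h⟩, fun h => hmem ⟨hord, Or.inr h⟩⟩
      have hc1 : pvC K k j = 0 := by
        unfold pvC
        rw [Int.natCast_eq_zero, List.count_eq_zero]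
        unfold pvPKey at hnK
        by_cases hkj : k < j
        · rw [if_pos hkj] at hnK; exact hnK.1
        · rw [if_neg hkj] at hnK; exact hnK.2
      have hc2 : pvC K j k = 0 := by
        unfold pvC
        rw [Int.natCast_eq_zero, List.count_eq_zero]
        unfold pvPKey at hnK
        by_cases hkj : k < j
        · rw [if_pos hkj] at hnK; exact hnK.2
        · rw [if_neg hkj] at hnK; exact hnK.1
      have hWiff : pvW K s k j ↔ pvSG s j < pvSG s k := by
        unfold pvW
        rw [hc1, hc2]
        constructor
        · rintro ⟨-, h | h⟩
          · omega
          · omega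
        · intro h
          exact ⟨hjk, Or.inr ⟨rfl, h⟩⟩
      by_cases hlt : pvSG s j < pvSG s k
      · rw [if_pos (hWiff.mpr hlt), if_pos hlt]; ring
      · rw [if_neg (fun hw => hlt (hWiff.mp hw)), if_neg hlt]; ring


lemma pv_sum_indicator (l : List Int) (p : Int → Prop) [DecidablePred p] :
    (l.map (fun w => if p w then (1 : Int) else 0)).sum = (l.countP (fun w => decide (p w)) : Int) := by
  induction l with
  | nil => simp
  | cons x l ih =>
    simp only [List.map_cons, List.sum_cons, List.countP_cons, ih]
    by_cases h : p x
    · simp [h]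
      ring
    · simp [h]

lemma pv_sum_single (L : List Int) (f : Int → Int) (k : Int) :
    ∀ (_ : L.Nodup) (_ : k ∈ L),
    (L.map (fun i => if k = i then f i else 0)).sum = f k := by
  induction L with
  | nil => intro _ h; cases h
  | cons x L ih =>
    intro hnd hk
    rw [List.nodup_cons] at hnd
    simp only [List.map_cons, List.sum_cons]
    by_cases hkx : k = x
    · have hz : (L.map (fun i => if k = i then f i else 0)).sum = 0 := by
        rw [List.sum_eq_zero]
        intro y hy
        rw [List.mem_map] at hy
        obtain ⟨i, hi, rfl⟩ := hy
        have hki : ¬ k = i := by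
          intro h
          rw [hkx] at h
          rw [← h] at hi
          exact hnd.1 hi
        rw [if_neg hki]
      rw [if_pos hkx, hz, hkx]
      ring
    · rw [if_neg hkx, ih hnd.2 ((List.mem_cons.mp hk).resolve_left hkx)]
      ring

lemma pvRepeat_getD (m k : Int) : PySem.List.pyGetD (PySem.List.pyRepeat [(0 : Int)] m) k 0 = 0 := by
  rw [PySem.List.pyRepeat_singleton]
  rcases pyGetD_mem_or (List.replicate m.toNat (0 : Int)) k 0 with h | h
  · exact h
  · exact List.eq_of_mem_replicate h

lemma pv_ext (n : Nat) (u v : List Int) (hu : u.length = n) (hv : v.length = n)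
    (h : ∀ k : Nat, k < n → PySem.List.pyGetD u (k : Int) 0 = PySem.List.pyGetD v (k : Int) 0) :
    u = v := by
  refine List.ext_getElem (by rw [hu, hv]) ?_
  intro k h1 h2
  have := h k (by omega)
  rw [PySem.List.pyGetD_natCast, PySem.List.pyGetD_natCast,
    List.getD_eq_getElem?_getD, List.getD_eq_getElem?_getD,
    List.getElem?_eq_getElem h1, List.getElem?_eq_getElem h2] at this
  simp at this
  exact this

-- base win count: the first-occurrence dict over the sorted scores is the strict rank
lemma pvBase (s : List Int) (n : Nat) (hs : s.length = n) (k : Int) (hk0 : 0 ≤ k) (hk : k < (n : Int)) :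
    ((PySem.List.enumerate (PySem.List.sorted s (fun x => x))).foldl
      (fun d p => if d.contains p.2 then d else d.insert p.2 p.1)
      (PySem.Dict.empty : PySem.Dict Int Int)).getD (pvSG s k) 0 = pvLtCnt s n k := by
  have hkn : k.toNat < s.length := by omega
  have hmem : pvSG s k ∈ s := by
    unfold pvSG
    rw [PySem.List.pyGetD_of_nonneg _ _ hk0, List.getD_eq_getElem?_getD,
      List.getElem?_eq_getElem hkn]
    exact List.getElem_mem hkn
  have hss : pvSG s k ∈ PySem.List.sorted s (fun x => x) :=
    (PySem.List.mem_sorted s (fun x => x) false (pvSG s k)).mpr hmem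
  have hpw : (PySem.List.sorted s (fun x => x)).Pairwise (· ≤ ·) :=
    PySem.List.sorted_pairwise s (fun x => x)
  rw [pvFirst_getD _ 0 _ _ hpw hss (by rw [PySem.Dict.contains_empty])]
  rw [List.Perm.countP_eq _ (PySem.List.sorted_perm s (fun x => x) false)]
  unfold pvLtCnt
  have h1 : (PySem.List.pyRange 0 (n : Int)).map (fun j => PySem.List.pyGetD s j 0) = s := by
    rw [← hs]
    exact PySem.List.map_pyGetD_pyRange_zero' s 0
  have h2 : (PySem.List.pyRange 0 (n : Int)).map (fun j => if pvSG s j < pvSG s k then (1 : Int) else 0)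
      = s.map (fun w => if w < pvSG s k then (1 : Int) else 0) := by
    calc (PySem.List.pyRange 0 (n : Int)).map (fun j => if pvSG s j < pvSG s k then (1 : Int) else 0)
        = ((PySem.List.pyRange 0 (n : Int)).map (fun j => PySem.List.pyGetD s j 0)).map
            (fun w => if w < pvSG s k then (1 : Int) else 0) := by
          rw [List.map_map]
          rfl
      _ = s.map (fun w => if w < pvSG s k then (1 : Int) else 0) := by rw [h1]
  rw [h2, pv_sum_indicator s (fun w => w < pvSG s k)]
  ring


-- one step of B's correction loop, at the getD level
lemma pvStepGetD (w : List Int) (a b v sa sb k : Int)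
    (ha : 0 ≤ a) (hab : a < b) (hb : b < (w.length : Int))
    (hk0 : 0 ≤ k) (hk : k < (w.length : Int)) :
    PySem.List.pyGetD
      (if v ≠ 0 then
        (if v > 0 then
          pvBump (if sa > sb then pvBump w a (-1) else if sb > sa then pvBump w b (-1) else w) a 1
         else
          pvBump (if sa > sb then pvBump w a (-1) else if sb > sa then pvBump w b (-1) else w) b 1)
      else w) k 0
    = PySem.List.pyGetD w k 0 +
      (if v ≠ 0 then
        (if sa > sb then (if k = a then -1 else 0)
         else if sb > sa then (if k = b then -1 else 0) else 0)
        + (if v > 0 then (if k = a then 1 else 0) else (if k = b then 1 else 0))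
      else 0) := by
  by_cases hv : v ≠ 0
  · rw [if_pos hv, if_pos hv]
    have hw1len : (if sa > sb then pvBump w a (-1) else if sb > sa then pvBump w b (-1) else w).length
        = w.length := by
      split_ifs <;> simp [pvBump_length]
    have hw1get : PySem.List.pyGetD
        (if sa > sb then pvBump w a (-1) else if sb > sa then pvBump w b (-1) else w) k 0
        = PySem.List.pyGetD w k 0 +
          (if sa > sb then (if k = a then -1 else 0)
           else if sb > sa then (if k = b then -1 else 0) else 0) := by
      by_cases h1 : sa > sb
      · rw [if_pos h1, if_pos h1, pvGetD_pvBump w a (-1) k ha (by omega) hk0 hk]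
      · rw [if_neg h1, if_neg h1]
        by_cases h2 : sb > sa
        · rw [if_pos h2, if_pos h2, pvGetD_pvBump w b (-1) k (by omega) hb hk0 hk]
        · rw [if_neg h2, if_neg h2]
          ring
    by_cases hvp : v > 0
    · rw [if_pos hvp, if_pos hvp,
        pvGetD_pvBump _ a 1 k ha (by rw [hw1len]; omega) hk0 (by rw [hw1len]; exact hk),
        hw1get]
      ring
    · rw [if_neg hvp, if_neg hvp,
        pvGetD_pvBump _ b 1 k (by omega) (by rw [hw1len]; exact hb) hk0 (by rw [hw1len]; exact hk),
        hw1get]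
      ring
  · rw [if_neg hv, if_neg hv]
    ring

-- the score vector both programs build
def pvScoreOf (n : Nat) (K : List (Int × Int)) : List Int :=
  K.foldl (fun sc p => pvBump (pvBump sc p.1 1) p.2 (-1)) (PySem.List.pyRepeat [(0 : Int)] (n : Int))

lemma pvScoreOf_length (n : Nat) (K : List (Int × Int)) : (pvScoreOf n K).length = n := by
  unfold pvScoreOf
  rw [pvFoldLen _ (fun w p => by rw [pvBump_length, pvBump_length]) K _,
    PySem.List.pyRepeat_singleton]
  simp



-- B's correction loop, summed up
lemma pvCorrFold (K : List (Int × Int)) (s : List Int) (v : Int × Int → Int)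
    (NK : List (Int × Int)) (n : Nat)
    (hmem : ∀ x ∈ NK, 0 ≤ x.1 ∧ x.1 < x.2 ∧ x.2 < (n : Int))
    (hv : ∀ x ∈ NK, v x = pvC K x.1 x.2 - pvC K x.2 x.1) :
    ∀ (w : List Int), w.length = n → ∀ k, 0 ≤ k → k < (n : Int) →
    PySem.List.pyGetD (NK.foldl (fun w x =>
      if v x ≠ 0 then
        let w1 := if PySem.List.pyGetD s x.1 0 > PySem.List.pyGetD s x.2 0 then pvBump w x.1 (-1)
                  else if PySem.List.pyGetD s x.2 0 > PySem.List.pyGetD s x.1 0 then pvBump w x.2 (-1)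
                  else w
        if v x > 0 then pvBump w1 x.1 1 else pvBump w1 x.2 1
      else w) w) k 0
    = PySem.List.pyGetD w k 0 + (NK.map (fun x => pvDelta K s k x)).sum := by
  intro w hw k hk0 hk
  refine pvFoldGetD n _ (fun x k => pvDelta K s k x) NK ?_ ?_ w hw k hk0 hk
  · intro w' x
    show (if v x ≠ 0 then
        (if v x > 0 then
          pvBump (if PySem.List.pyGetD s x.1 0 > PySem.List.pyGetD s x.2 0 then pvBump w' x.1 (-1)
                  else if PySem.List.pyGetD s x.2 0 > PySem.List.pyGetD s x.1 0 then pvBump w' x.2 (-1)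
                  else w') x.1 1
         else
          pvBump (if PySem.List.pyGetD s x.1 0 > PySem.List.pyGetD s x.2 0 then pvBump w' x.1 (-1)
                  else if PySem.List.pyGetD s x.2 0 > PySem.List.pyGetD s x.1 0 then pvBump w' x.2 (-1)
                  else w') x.2 1)
      else w').length = w'.length
    split_ifs <;> simp [pvBump_length]
  · intro w' x k' hx hw' hk0' hk'
    obtain ⟨h0, h12, h2n⟩ := hmem x hx
    show PySem.List.pyGetD (if v x ≠ 0 then
        (if v x > 0 then
          pvBump (if PySem.List.pyGetD s x.1 0 > PySem.List.pyGetD s x.2 0 then pvBump w' x.1 (-1)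
                  else if PySem.List.pyGetD s x.2 0 > PySem.List.pyGetD s x.1 0 then pvBump w' x.2 (-1)
                  else w') x.1 1
         else
          pvBump (if PySem.List.pyGetD s x.1 0 > PySem.List.pyGetD s x.2 0 then pvBump w' x.1 (-1)
                  else if PySem.List.pyGetD s x.2 0 > PySem.List.pyGetD s x.1 0 then pvBump w' x.2 (-1)
                  else w') x.2 1)
      else w') k' 0 = PySem.List.pyGetD w' k' 0 + pvDelta K s k' x
    rw [pvStepGetD w' x.1 x.2 (v x) (PySem.List.pyGetD s x.1 0) (PySem.List.pyGetD s x.2 0) k'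
      h0 h12 (by rw [hw']; exact h2n) hk0' (by rw [hw']; exact hk'),
      hv x hx]
    rfl

-- THE CRUX: A's all-pairs comparison list equals B's rank-and-correct list
lemma pvCrux (n : Nat) (K : List (Int × Int))
    (hK : ∀ p ∈ K, (0 ≤ p.1 ∧ p.1 < (n : Int)) ∧ (0 ≤ p.2 ∧ p.2 < (n : Int))) :
    (PySem.List.pyRange 0 (n : Int)).foldl
      (fun gp i => (PySem.List.pyRange 0 (n : Int)).foldl
        (fun gp j =>
          if i = j then gp
          else if PySem.List.pyGetD (PySem.List.pyGetD (pvMatOf n K) i []) j 0 >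
                  PySem.List.pyGetD (PySem.List.pyGetD (pvMatOf n K) j []) i 0 then pvBump gp i 1
          else if PySem.List.pyGetD (PySem.List.pyGetD (pvMatOf n K) i []) j 0 =
                  PySem.List.pyGetD (PySem.List.pyGetD (pvMatOf n K) j []) i 0 ∧
                  PySem.List.pyGetD (pvScoreOf n K) i 0 > PySem.List.pyGetD (pvScoreOf n K) j 0 then pvBump gp i 1
          else gp) gp) (PySem.List.pyRepeat [(0 : Int)] (n : Int))
    = ((PySem.Dict.counter K).items.foldl
        (fun net pk =>
          if pk.1.1 < pk.1.2 then net.insert (pk.1.1, pk.1.2) (net.getD (pk.1.1, pk.1.2) 0 + pk.2)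
          else if pk.1.2 < pk.1.1 then net.insert (pk.1.2, pk.1.1) (net.getD (pk.1.2, pk.1.1) 0 - pk.2)
          else net) (PySem.Dict.empty : PySem.Dict (Int × Int) Int)).items.foldl
        (fun w pv =>
          if pv.2 ≠ 0 then
            let w1 := if PySem.List.pyGetD (pvScoreOf n K) pv.1.1 0 > PySem.List.pyGetD (pvScoreOf n K) pv.1.2 0 then pvBump w pv.1.1 (-1)
                      else if PySem.List.pyGetD (pvScoreOf n K) pv.1.2 0 > PySem.List.pyGetD (pvScoreOf n K) pv.1.1 0 then pvBump w pv.1.2 (-1)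
                      else w
            if pv.2 > 0 then pvBump w1 pv.1.1 1 else pvBump w1 pv.1.2 1
          else w)
        ((PySem.List.pyRange 0 (n : Int)).map (fun i =>
          ((PySem.List.enumerate (PySem.List.sorted (pvScoreOf n K) (fun x => x))).foldl
            (fun d p => if d.contains p.2 then d else d.insert p.2 p.1)
            (PySem.Dict.empty : PySem.Dict Int Int)).getD
            (PySem.List.pyGetD (pvScoreOf n K) i 0) 0)) := by
  have hslen : (pvScoreOf n K).length = n := pvScoreOf_length n K
  -- matrix entries are directed counts
  have hshape0 : pvShape (pvGive0 n) n := by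
    constructor
    · simp [pvGive0, PySem.List.length_pyRange_one]
    · intro r hr
      rw [pvGive0, List.mem_map] at hr
      obtain ⟨_, _, hr⟩ := hr
      rw [← hr, PySem.List.pyRepeat_singleton]
      simp
  have hent : ∀ i j : Int, 0 ≤ i → i < (n : Int) → 0 ≤ j → j < (n : Int) →
      PySem.List.pyGetD (PySem.List.pyGetD (pvMatOf n K) i []) j 0 = pvC K i j := by
    intro i j hi0 hi hj0 hj
    have h1 := pvMatCount n K hK (pvGive0 n) hshape0 i j ⟨hi0, hi⟩ ⟨hj0, hj⟩
    have hz : pvEntry (pvGive0 n) i j = 0 := pvEntry_zero n i j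
    rw [hz] at h1
    show pvEntry (pvMatOf n K) i j = pvC K i j
    unfold pvMatOf pvC
    rw [h1]
    ring
  -- ===== A side =====
  have hinnerlen : ∀ (w : List Int) (i : Int),
      ((PySem.List.pyRange 0 (n : Int)).foldl
        (fun gp j =>
          if i = j then gp
          else if PySem.List.pyGetD (PySem.List.pyGetD (pvMatOf n K) i []) j 0 >
                  PySem.List.pyGetD (PySem.List.pyGetD (pvMatOf n K) j []) i 0 then pvBump gp i 1
          else if PySem.List.pyGetD (PySem.List.pyGetD (pvMatOf n K) i []) j 0 =
                  PySem.List.pyGetD (PySem.List.pyGetD (pvMatOf n K) j []) i 0 ∧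
                  PySem.List.pyGetD (pvScoreOf n K) i 0 > PySem.List.pyGetD (pvScoreOf n K) j 0 then pvBump gp i 1
          else gp) w).length = w.length := by
    intro w i
    exact pvFoldLen _ (fun w' j => by split_ifs <;> simp [pvBump_length]) _ w
  have hAlen : ((PySem.List.pyRange 0 (n : Int)).foldl
      (fun gp i => (PySem.List.pyRange 0 (n : Int)).foldl
        (fun gp j =>
          if i = j then gp
          else if PySem.List.pyGetD (PySem.List.pyGetD (pvMatOf n K) i []) j 0 >
                  PySem.List.pyGetD (PySem.List.pyGetD (pvMatOf n K) j []) i 0 then pvBump gp i 1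
          else if PySem.List.pyGetD (PySem.List.pyGetD (pvMatOf n K) i []) j 0 =
                  PySem.List.pyGetD (PySem.List.pyGetD (pvMatOf n K) j []) i 0 ∧
                  PySem.List.pyGetD (pvScoreOf n K) i 0 > PySem.List.pyGetD (pvScoreOf n K) j 0 then pvBump gp i 1
          else gp) gp) (PySem.List.pyRepeat [(0 : Int)] (n : Int))).length = n := by
    rw [pvFoldLen _ hinnerlen _ _, PySem.List.pyRepeat_singleton]
    simp
  have hinitlen : (PySem.List.pyRepeat [(0 : Int)] (n : Int)).length = n := by
    rw [PySem.List.pyRepeat_singleton]; simp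
  have hAget : ∀ k : Int, 0 ≤ k → k < (n : Int) →
      PySem.List.pyGetD ((PySem.List.pyRange 0 (n : Int)).foldl
      (fun gp i => (PySem.List.pyRange 0 (n : Int)).foldl
        (fun gp j =>
          if i = j then gp
          else if PySem.List.pyGetD (PySem.List.pyGetD (pvMatOf n K) i []) j 0 >
                  PySem.List.pyGetD (PySem.List.pyGetD (pvMatOf n K) j []) i 0 then pvBump gp i 1
          else if PySem.List.pyGetD (PySem.List.pyGetD (pvMatOf n K) i []) j 0 =
                  PySem.List.pyGetD (PySem.List.pyGetD (pvMatOf n K) j []) i 0 ∧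
                  PySem.List.pyGetD (pvScoreOf n K) i 0 > PySem.List.pyGetD (pvScoreOf n K) j 0 then pvBump gp i 1
          else gp) gp) (PySem.List.pyRepeat [(0 : Int)] (n : Int))) k 0
      = pvRowA K (pvScoreOf n K) n k := by
    intro k hk0 hk
    rw [pvFoldGetD n _ (fun i k' => if k' = i then pvRowA K (pvScoreOf n K) n i else 0)
      (PySem.List.pyRange 0 (n : Int)) hinnerlen ?_ _ hinitlen k hk0 hk,
      pvRepeat_getD,
      pv_sum_single _ _ _ (PySem.List.nodup_pyRange_one 0 (n : Int))
        (PySem.List.mem_pyRange_one.mpr ⟨hk0, hk⟩)]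
    · ring
    · intro w i k' hiR hw hk0' hk'
      obtain ⟨hi0, hi⟩ := PySem.List.mem_pyRange_one.mp hiR
      rw [PySem.List.foldl_congr_mem _ _
        (fun gp j => if pvW K (pvScoreOf n K) i j then pvBump gp i 1 else gp) w ?_]
      · rw [pvInnerGetD (pvW K (pvScoreOf n K) i) i _ w hi0 (by rw [hw]; exact hi) k' hk0'
          (by rw [hw]; exact hk')]
        rfl
      · intro gp j hj
        obtain ⟨hj0, hjn⟩ := PySem.List.mem_pyRange_one.mp hj
        show _ = if pvW K (pvScoreOf n K) i j then pvBump gp i 1 else gp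
        by_cases hij : i = j
        · rw [if_pos hij, if_neg (fun hw' => hw'.1 hij.symm)]
        · rw [if_neg hij]
          simp only [hent i j hi0 hi hj0 hjn, hent j i hj0 hjn hi0 hi]
          by_cases hX : pvC K i j > pvC K j i
          · rw [if_pos hX, if_pos (show pvW K (pvScoreOf n K) i j from
              ⟨fun h => hij h.symm, Or.inl hX⟩)]
          · rw [if_neg hX]
            by_cases hY : pvC K i j = pvC K j i ∧
                PySem.List.pyGetD (pvScoreOf n K) i 0 > PySem.List.pyGetD (pvScoreOf n K) j 0
            · rw [if_pos hY, if_pos (show pvW K (pvScoreOf n K) i j from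
                ⟨fun h => hij h.symm, Or.inr hY⟩)]
            · rw [if_neg hY, if_neg (fun hw' => hw'.2.elim hX hY)]
  -- ===== B side: the net dict =====
  have hnet : ((PySem.Dict.counter K).items.foldl
        (fun net pk =>
          if pk.1.1 < pk.1.2 then net.insert (pk.1.1, pk.1.2) (net.getD (pk.1.1, pk.1.2) 0 + pk.2)
          else if pk.1.2 < pk.1.1 then net.insert (pk.1.2, pk.1.1) (net.getD (pk.1.2, pk.1.1) 0 - pk.2)
          else net) (PySem.Dict.empty : PySem.Dict (Int × Int) Int))
      = (PySem.Set.ofList K).foldl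
        (fun net q =>
          if q.1 < q.2 then net.insert (q.1, q.2) (net.getD (q.1, q.2) 0 + (K.count q : Int))
          else if q.2 < q.1 then net.insert (q.2, q.1) (net.getD (q.2, q.1) 0 - (K.count q : Int))
          else net) PySem.Dict.empty := by
    rw [PySem.Dict.items_counter K, List.foldl_map]
  have hnodupNK : ((PySem.Set.ofList K).foldl
        (fun net q =>
          if q.1 < q.2 then net.insert (q.1, q.2) (net.getD (q.1, q.2) 0 + (K.count q : Int))
          else if q.2 < q.1 then net.insert (q.2, q.1) (net.getD (q.2, q.1) 0 - (K.count q : Int))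
          else net) (PySem.Dict.empty : PySem.Dict (Int × Int) Int)).keys.Nodup :=
    pvNet_nodup_keys _ _ _ PySem.Dict.nodup_keys_empty
  have hmemNK : ∀ x : Int × Int, (x ∈ ((PySem.Set.ofList K).foldl
        (fun net q =>
          if q.1 < q.2 then net.insert (q.1, q.2) (net.getD (q.1, q.2) 0 + (K.count q : Int))
          else if q.2 < q.1 then net.insert (q.2, q.1) (net.getD (q.2, q.1) 0 - (K.count q : Int))
          else net) (PySem.Dict.empty : PySem.Dict (Int × Int) Int)).keys)
      ↔ x.1 < x.2 ∧ ((x.1, x.2) ∈ K ∨ (x.2, x.1) ∈ K) := by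
    intro x
    rw [pvNet_mem_keys _ _ _ x]
    simp [PySem.Dict.keys_empty, PySem.Set.mem_ofList]
  have hvget : ∀ a b : Int, a < b → ((PySem.Set.ofList K).foldl
        (fun net q =>
          if q.1 < q.2 then net.insert (q.1, q.2) (net.getD (q.1, q.2) 0 + (K.count q : Int))
          else if q.2 < q.1 then net.insert (q.2, q.1) (net.getD (q.2, q.1) 0 - (K.count q : Int))
          else net) (PySem.Dict.empty : PySem.Dict (Int × Int) Int)).getD (a, b) 0
      = pvC K a b - pvC K b a := by
    intro a b hab
    rw [pvNet_getD _ _ a b hab _ (PySem.Set.nodup_ofList K), PySem.Dict.getD_empty]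
    unfold pvC
    by_cases h1 : ((a, b) : Int × Int) ∈ PySem.Set.ofList K
    · by_cases h2 : ((b, a) : Int × Int) ∈ PySem.Set.ofList K
      · rw [if_pos h1, if_pos h2]; ring
      · rw [if_pos h1, if_neg h2]
        have : K.count (b, a) = 0 :=
          List.count_eq_zero.mpr (fun hm => h2 ((PySem.Set.mem_ofList K _).mpr hm))
        rw [this]
        push_cast
        ring
    · rw [if_neg h1]
      have hc1 : K.count (a, b) = 0 :=
        List.count_eq_zero.mpr (fun hm => h1 ((PySem.Set.mem_ofList K _).mpr hm))
      by_cases h2 : ((b, a) : Int × Int) ∈ PySem.Set.ofList K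
      · rw [if_pos h2, hc1]
        push_cast
        ring
      · rw [if_neg h2]
        have hc2 : K.count (b, a) = 0 :=
          List.count_eq_zero.mpr (fun hm => h2 ((PySem.Set.mem_ofList K _).mpr hm))
        rw [hc1, hc2]
        norm_num
  set netC := (PySem.Set.ofList K).foldl
      (fun net q =>
        if q.1 < q.2 then net.insert (q.1, q.2) (net.getD (q.1, q.2) 0 + (K.count q : Int))
        else if q.2 < q.1 then net.insert (q.2, q.1) (net.getD (q.2, q.1) 0 - (K.count q : Int))
        else net) (PySem.Dict.empty : PySem.Dict (Int × Int) Int) with hnetCdef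
  -- the base wins list
  have hwinslen : ((PySem.List.pyRange 0 (n : Int)).map (fun i =>
      ((PySem.List.enumerate (PySem.List.sorted (pvScoreOf n K) (fun x => x))).foldl
        (fun d p => if d.contains p.2 then d else d.insert p.2 p.1)
        (PySem.Dict.empty : PySem.Dict Int Int)).getD
        (PySem.List.pyGetD (pvScoreOf n K) i 0) 0)).length = n := by
    rw [List.length_map, PySem.List.length_pyRange_one]
    simp
  have hwinsget : ∀ k : Int, 0 ≤ k → k < (n : Int) →
      PySem.List.pyGetD ((PySem.List.pyRange 0 (n : Int)).map (fun i =>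
      ((PySem.List.enumerate (PySem.List.sorted (pvScoreOf n K) (fun x => x))).foldl
        (fun d p => if d.contains p.2 then d else d.insert p.2 p.1)
        (PySem.Dict.empty : PySem.Dict Int Int)).getD
        (PySem.List.pyGetD (pvScoreOf n K) i 0) 0)) k 0 = pvLtCnt (pvScoreOf n K) n k := by
    intro k hk0 hk
    rw [PySem.List.pyGetD_map_pyRange_of_nonneg _ _ _ _ hk0 hk]
    exact pvBase (pvScoreOf n K) n hslen k hk0 hk
  have hmem' : ∀ x ∈ netC.keys, 0 ≤ x.1 ∧ x.1 < x.2 ∧ x.2 < (n : Int) := by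
    intro x hx
    obtain ⟨hlt, hK1 | hK1⟩ := (hmemNK x).mp hx
    · exact ⟨(hK _ hK1).1.1, hlt, (hK _ hK1).2.2⟩
    · exact ⟨(hK _ hK1).2.1, hlt, (hK _ hK1).1.2⟩
  have hv' : ∀ x ∈ netC.keys, netC.getD x 0 = pvC K x.1 x.2 - pvC K x.2 x.1 := by
    intro x hx
    exact hvget x.1 x.2 ((hmemNK x).mp hx).1
  have hsteplen : ∀ (w : List Int) (pv : (Int × Int) × Int),
      ((fun w pv =>
        if pv.2 ≠ 0 then
          let w1 := if PySem.List.pyGetD (pvScoreOf n K) pv.1.1 0 > PySem.List.pyGetD (pvScoreOf n K) pv.1.2 0 then pvBump w pv.1.1 (-1)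
                    else if PySem.List.pyGetD (pvScoreOf n K) pv.1.2 0 > PySem.List.pyGetD (pvScoreOf n K) pv.1.1 0 then pvBump w pv.1.2 (-1)
                    else w
          if pv.2 > 0 then pvBump w1 pv.1.1 1 else pvBump w1 pv.1.2 1
        else w) w pv : List Int).length = w.length := by
    intro w pv
    show (if pv.2 ≠ 0 then
        (if pv.2 > 0 then
          pvBump (if PySem.List.pyGetD (pvScoreOf n K) pv.1.1 0 > PySem.List.pyGetD (pvScoreOf n K) pv.1.2 0 then pvBump w pv.1.1 (-1)
                  else if PySem.List.pyGetD (pvScoreOf n K) pv.1.2 0 > PySem.List.pyGetD (pvScoreOf n K) pv.1.1 0 then pvBump w pv.1.2 (-1)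
                  else w) pv.1.1 1
         else
          pvBump (if PySem.List.pyGetD (pvScoreOf n K) pv.1.1 0 > PySem.List.pyGetD (pvScoreOf n K) pv.1.2 0 then pvBump w pv.1.1 (-1)
                  else if PySem.List.pyGetD (pvScoreOf n K) pv.1.2 0 > PySem.List.pyGetD (pvScoreOf n K) pv.1.1 0 then pvBump w pv.1.2 (-1)
                  else w) pv.1.2 1)
      else w).length = w.length
    split_ifs <;> simp [pvBump_length]
  refine pv_ext n _ _ hAlen ?_ ?_
  · rw [pvFoldLen _ hsteplen _ _]
    exact hwinslen
  · intro kN hkN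
    have hk0 : (0 : Int) ≤ (kN : Int) := by positivity
    have hkn : ((kN : Int) : Int) < (n : Int) := by exact_mod_cast hkN
    rw [hAget kN hk0 hkn, hnet, PySem.Dict.items_eq_map_keys _ hnodupNK 0, List.foldl_map]
    have hB := pvCorrFold K (pvScoreOf n K) (fun x => netC.getD x 0) netC.keys n hmem' hv'
      _ hwinslen kN hk0 hkn
    rw [hwinsget kN hk0 hkn] at hB
    dsimp only at hB ⊢
    rw [hB]
    have hsum := pvReindex n (kN : Int) (fun x => pvDelta K (pvScoreOf n K) kN x) netC.keys
      hnodupNK (fun x hx => ⟨(hmem' x hx).2.1, (hmem' x hx).1, (hmem' x hx).2.2⟩)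
      (fun x _ h1 h2 => pvDelta_zero _ _ _ _ h1 h2)
    have h1 := pv_sum_sub (PySem.List.pyRange 0 (n : Int))
      (fun j => if pvW K (pvScoreOf n K) kN j then (1 : Int) else 0)
      (fun j => if pvSG (pvScoreOf n K) j < pvSG (pvScoreOf n K) kN then (1 : Int) else 0)
    have h2 : (PySem.List.pyRange 0 (n : Int)).map
        (fun j => (if pvW K (pvScoreOf n K) kN j then (1 : Int) else 0)
          - (if pvSG (pvScoreOf n K) j < pvSG (pvScoreOf n K) kN then (1 : Int) else 0))
        = (PySem.List.pyRange 0 (n : Int)).map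
          (fun j => if pvPKey kN j ∈ netC.keys then pvDelta K (pvScoreOf n K) kN (pvPKey kN j) else 0) :=
      List.map_congr_left (fun j _ => pvTermwise K (pvScoreOf n K) netC.keys hmemNK kN j)
    have hdiff : pvRowA K (pvScoreOf n K) n kN - pvLtCnt (pvScoreOf n K) n kN
        = (netC.keys.map (fun x => pvDelta K (pvScoreOf n K) kN x)).sum := by
      unfold pvRowA pvLtCnt
      rw [← h1, h2]
      exact hsum
    linarith [hdiff]


-- phase-1 state reduction and hand-off to the crux, in the exact shapes of the two ports
lemma pvMain2 (gifts : List String) (n : Nat) (d : PySem.Dict String Int)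
    (hd : ∀ k, 0 ≤ d.getD k 0 ∧ d.getD k 0 < (n : Int)) :
    ((PySem.List.max? ((PySem.List.pyRange 0 (n : Int)).foldl
      (fun gp i => (PySem.List.pyRange 0 (n : Int)).foldl
        (fun gp j =>
          if i = j then gp
          else if PySem.List.pyGetD (PySem.List.pyGetD ((PySem.List.pyRange 0 (PySem.List.len gifts)).foldl
              (fun st i =>
                (pvBump2 st.1 (d.getD (PySem.List.pyGetD (PySem.Str.split₀ (PySem.List.pyGetD gifts i "")) 0 "") 0)
                  (d.getD (PySem.List.pyGetD (PySem.Str.split₀ (PySem.List.pyGetD gifts i "")) 1 "") 0),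
                 pvBump (pvBump st.2 (d.getD (PySem.List.pyGetD (PySem.Str.split₀ (PySem.List.pyGetD gifts i "")) 0 "") 0) 1)
                   (d.getD (PySem.List.pyGetD (PySem.Str.split₀ (PySem.List.pyGetD gifts i "")) 1 "") 0) (-1)))
              ((PySem.List.pyRange 0 (n : Int)).map (fun _ => PySem.List.pyRepeat [(0 : Int)] (n : Int)),
               PySem.List.pyRepeat [(0 : Int)] (n : Int))).1 i []) j 0 >
                  PySem.List.pyGetD (PySem.List.pyGetD ((PySem.List.pyRange 0 (PySem.List.len gifts)).foldl
              (fun st i =>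
                (pvBump2 st.1 (d.getD (PySem.List.pyGetD (PySem.Str.split₀ (PySem.List.pyGetD gifts i "")) 0 "") 0)
                  (d.getD (PySem.List.pyGetD (PySem.Str.split₀ (PySem.List.pyGetD gifts i "")) 1 "") 0),
                 pvBump (pvBump st.2 (d.getD (PySem.List.pyGetD (PySem.Str.split₀ (PySem.List.pyGetD gifts i "")) 0 "") 0) 1)
                   (d.getD (PySem.List.pyGetD (PySem.Str.split₀ (PySem.List.pyGetD gifts i "")) 1 "") 0) (-1)))
              ((PySem.List.pyRange 0 (n : Int)).map (fun _ => PySem.List.pyRepeat [(0 : Int)] (n : Int)),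
               PySem.List.pyRepeat [(0 : Int)] (n : Int))).1 j []) i 0 then pvBump gp i 1
          else if PySem.List.pyGetD (PySem.List.pyGetD ((PySem.List.pyRange 0 (PySem.List.len gifts)).foldl
              (fun st i =>
                (pvBump2 st.1 (d.getD (PySem.List.pyGetD (PySem.Str.split₀ (PySem.List.pyGetD gifts i "")) 0 "") 0)
                  (d.getD (PySem.List.pyGetD (PySem.Str.split₀ (PySem.List.pyGetD gifts i "")) 1 "") 0),
                 pvBump (pvBump st.2 (d.getD (PySem.List.pyGetD (PySem.Str.split₀ (PySem.List.pyGetD gifts i "")) 0 "") 0) 1)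
                   (d.getD (PySem.List.pyGetD (PySem.Str.split₀ (PySem.List.pyGetD gifts i "")) 1 "") 0) (-1)))
              ((PySem.List.pyRange 0 (n : Int)).map (fun _ => PySem.List.pyRepeat [(0 : Int)] (n : Int)),
               PySem.List.pyRepeat [(0 : Int)] (n : Int))).1 i []) j 0 =
                  PySem.List.pyGetD (PySem.List.pyGetD ((PySem.List.pyRange 0 (PySem.List.len gifts)).foldl
              (fun st i =>
                (pvBump2 st.1 (d.getD (PySem.List.pyGetD (PySem.Str.split₀ (PySem.List.pyGetD gifts i "")) 0 "") 0)
                  (d.getD (PySem.List.pyGetD (PySem.Str.split₀ (PySem.List.pyGetD gifts i "")) 1 "") 0),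
                 pvBump (pvBump st.2 (d.getD (PySem.List.pyGetD (PySem.Str.split₀ (PySem.List.pyGetD gifts i "")) 0 "") 0) 1)
                   (d.getD (PySem.List.pyGetD (PySem.Str.split₀ (PySem.List.pyGetD gifts i "")) 1 "") 0) (-1)))
              ((PySem.List.pyRange 0 (n : Int)).map (fun _ => PySem.List.pyRepeat [(0 : Int)] (n : Int)),
               PySem.List.pyRepeat [(0 : Int)] (n : Int))).1 j []) i 0 ∧
                  PySem.List.pyGetD ((PySem.List.pyRange 0 (PySem.List.len gifts)).foldl
              (fun st i =>
                (pvBump2 st.1 (d.getD (PySem.List.pyGetD (PySem.Str.split₀ (PySem.List.pyGetD gifts i "")) 0 "") 0)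
                  (d.getD (PySem.List.pyGetD (PySem.Str.split₀ (PySem.List.pyGetD gifts i "")) 1 "") 0),
                 pvBump (pvBump st.2 (d.getD (PySem.List.pyGetD (PySem.Str.split₀ (PySem.List.pyGetD gifts i "")) 0 "") 0) 1)
                   (d.getD (PySem.List.pyGetD (PySem.Str.split₀ (PySem.List.pyGetD gifts i "")) 1 "") 0) (-1)))
              ((PySem.List.pyRange 0 (n : Int)).map (fun _ => PySem.List.pyRepeat [(0 : Int)] (n : Int)),
               PySem.List.pyRepeat [(0 : Int)] (n : Int))).2 i 0 >
                  PySem.List.pyGetD ((PySem.List.pyRange 0 (PySem.List.len gifts)).foldl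
              (fun st i =>
                (pvBump2 st.1 (d.getD (PySem.List.pyGetD (PySem.Str.split₀ (PySem.List.pyGetD gifts i "")) 0 "") 0)
                  (d.getD (PySem.List.pyGetD (PySem.Str.split₀ (PySem.List.pyGetD gifts i "")) 1 "") 0),
                 pvBump (pvBump st.2 (d.getD (PySem.List.pyGetD (PySem.Str.split₀ (PySem.List.pyGetD gifts i "")) 0 "") 0) 1)
                   (d.getD (PySem.List.pyGetD (PySem.Str.split₀ (PySem.List.pyGetD gifts i "")) 1 "") 0) (-1)))
              ((PySem.List.pyRange 0 (n : Int)).map (fun _ => PySem.List.pyRepeat [(0 : Int)] (n : Int)),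
               PySem.List.pyRepeat [(0 : Int)] (n : Int))).2 j 0 then pvBump gp i 1
          else gp) gp) (PySem.List.pyRepeat [(0 : Int)] (n : Int))) (fun y => y)).getD 0)
    = ((PySem.List.max? (((gifts.foldl
        (fun st gift =>
          (st.1.insert (d.getD (PySem.List.pyGetD (PySem.Str.split₀ gift) 0 "") 0,
                        d.getD (PySem.List.pyGetD (PySem.Str.split₀ gift) 1 "") 0)
             (st.1.getD (d.getD (PySem.List.pyGetD (PySem.Str.split₀ gift) 0 "") 0,
                         d.getD (PySem.List.pyGetD (PySem.Str.split₀ gift) 1 "") 0) 0 + 1),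
           pvBump (pvBump st.2 (d.getD (PySem.List.pyGetD (PySem.Str.split₀ gift) 0 "") 0) 1)
             (d.getD (PySem.List.pyGetD (PySem.Str.split₀ gift) 1 "") 0) (-1)))
        ((PySem.Dict.empty : PySem.Dict (Int × Int) Int), PySem.List.pyRepeat [(0 : Int)] (n : Int))).1.items.foldl
        (fun net pk =>
          if pk.1.1 < pk.1.2 then net.insert (pk.1.1, pk.1.2) (net.getD (pk.1.1, pk.1.2) 0 + pk.2)
          else if pk.1.2 < pk.1.1 then net.insert (pk.1.2, pk.1.1) (net.getD (pk.1.2, pk.1.1) 0 - pk.2)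
          else net) (PySem.Dict.empty : PySem.Dict (Int × Int) Int)).items.foldl
        (fun w pv =>
          if pv.2 ≠ 0 then
            let w1 := if PySem.List.pyGetD ((gifts.foldl
                (fun st gift =>
                  (st.1.insert (d.getD (PySem.List.pyGetD (PySem.Str.split₀ gift) 0 "") 0,
                                d.getD (PySem.List.pyGetD (PySem.Str.split₀ gift) 1 "") 0)
                     (st.1.getD (d.getD (PySem.List.pyGetD (PySem.Str.split₀ gift) 0 "") 0,
                                 d.getD (PySem.List.pyGetD (PySem.Str.split₀ gift) 1 "") 0) 0 + 1),
                   pvBump (pvBump st.2 (d.getD (PySem.List.pyGetD (PySem.Str.split₀ gift) 0 "") 0) 1)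
                     (d.getD (PySem.List.pyGetD (PySem.Str.split₀ gift) 1 "") 0) (-1)))
                ((PySem.Dict.empty : PySem.Dict (Int × Int) Int), PySem.List.pyRepeat [(0 : Int)] (n : Int))).2) pv.1.1 0 >
                PySem.List.pyGetD ((gifts.foldl
                (fun st gift =>
                  (st.1.insert (d.getD (PySem.List.pyGetD (PySem.Str.split₀ gift) 0 "") 0,
                                d.getD (PySem.List.pyGetD (PySem.Str.split₀ gift) 1 "") 0)
                     (st.1.getD (d.getD (PySem.List.pyGetD (PySem.Str.split₀ gift) 0 "") 0,
                                 d.getD (PySem.List.pyGetD (PySem.Str.split₀ gift) 1 "") 0) 0 + 1),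
                   pvBump (pvBump st.2 (d.getD (PySem.List.pyGetD (PySem.Str.split₀ gift) 0 "") 0) 1)
                     (d.getD (PySem.List.pyGetD (PySem.Str.split₀ gift) 1 "") 0) (-1)))
                ((PySem.Dict.empty : PySem.Dict (Int × Int) Int), PySem.List.pyRepeat [(0 : Int)] (n : Int))).2) pv.1.2 0 then pvBump w pv.1.1 (-1)
              else if PySem.List.pyGetD ((gifts.foldl
                (fun st gift =>
                  (st.1.insert (d.getD (PySem.List.pyGetD (PySem.Str.split₀ gift) 0 "") 0,
                                d.getD (PySem.List.pyGetD (PySem.Str.split₀ gift) 1 "") 0)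
                     (st.1.getD (d.getD (PySem.List.pyGetD (PySem.Str.split₀ gift) 0 "") 0,
                                 d.getD (PySem.List.pyGetD (PySem.Str.split₀ gift) 1 "") 0) 0 + 1),
                   pvBump (pvBump st.2 (d.getD (PySem.List.pyGetD (PySem.Str.split₀ gift) 0 "") 0) 1)
                     (d.getD (PySem.List.pyGetD (PySem.Str.split₀ gift) 1 "") 0) (-1)))
                ((PySem.Dict.empty : PySem.Dict (Int × Int) Int), PySem.List.pyRepeat [(0 : Int)] (n : Int))).2) pv.1.2 0 >
                PySem.List.pyGetD ((gifts.foldl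
                (fun st gift =>
                  (st.1.insert (d.getD (PySem.List.pyGetD (PySem.Str.split₀ gift) 0 "") 0,
                                d.getD (PySem.List.pyGetD (PySem.Str.split₀ gift) 1 "") 0)
                     (st.1.getD (d.getD (PySem.List.pyGetD (PySem.Str.split₀ gift) 0 "") 0,
                                 d.getD (PySem.List.pyGetD (PySem.Str.split₀ gift) 1 "") 0) 0 + 1),
                   pvBump (pvBump st.2 (d.getD (PySem.List.pyGetD (PySem.Str.split₀ gift) 0 "") 0) 1)
                     (d.getD (PySem.List.pyGetD (PySem.Str.split₀ gift) 1 "") 0) (-1)))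
                ((PySem.Dict.empty : PySem.Dict (Int × Int) Int), PySem.List.pyRepeat [(0 : Int)] (n : Int))).2) pv.1.1 0 then pvBump w pv.1.2 (-1)
              else w
            if pv.2 > 0 then pvBump w1 pv.1.1 1 else pvBump w1 pv.1.2 1
          else w)
        ((PySem.List.pyRange 0 (n : Int)).map (fun i =>
          ((PySem.List.enumerate (PySem.List.sorted ((gifts.foldl
            (fun st gift =>
              (st.1.insert (d.getD (PySem.List.pyGetD (PySem.Str.split₀ gift) 0 "") 0,
                            d.getD (PySem.List.pyGetD (PySem.Str.split₀ gift) 1 "") 0)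
                 (st.1.getD (d.getD (PySem.List.pyGetD (PySem.Str.split₀ gift) 0 "") 0,
                             d.getD (PySem.List.pyGetD (PySem.Str.split₀ gift) 1 "") 0) 0 + 1),
               pvBump (pvBump st.2 (d.getD (PySem.List.pyGetD (PySem.Str.split₀ gift) 0 "") 0) 1)
                 (d.getD (PySem.List.pyGetD (PySem.Str.split₀ gift) 1 "") 0) (-1)))
            ((PySem.Dict.empty : PySem.Dict (Int × Int) Int), PySem.List.pyRepeat [(0 : Int)] (n : Int))).2) (fun x => x))).foldl
            (fun d p => if d.contains p.2 then d else d.insert p.2 p.1)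
            (PySem.Dict.empty : PySem.Dict Int Int)).getD
            (PySem.List.pyGetD ((gifts.foldl
            (fun st gift =>
              (st.1.insert (d.getD (PySem.List.pyGetD (PySem.Str.split₀ gift) 0 "") 0,
                            d.getD (PySem.List.pyGetD (PySem.Str.split₀ gift) 1 "") 0)
                 (st.1.getD (d.getD (PySem.List.pyGetD (PySem.Str.split₀ gift) 0 "") 0,
                             d.getD (PySem.List.pyGetD (PySem.Str.split₀ gift) 1 "") 0) 0 + 1),
               pvBump (pvBump st.2 (d.getD (PySem.List.pyGetD (PySem.Str.split₀ gift) 0 "") 0) 1)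
                 (d.getD (PySem.List.pyGetD (PySem.Str.split₀ gift) 1 "") 0) (-1)))
            ((PySem.Dict.empty : PySem.Dict (Int × Int) Int), PySem.List.pyRepeat [(0 : Int)] (n : Int))).2) i 0) 0)))
        (fun y => y)).getD 0) := by
  have hK : ∀ p ∈ gifts.map (pvKey d), (0 ≤ p.1 ∧ p.1 < (n : Int)) ∧ (0 ≤ p.2 ∧ p.2 < (n : Int)) := by
    intro p hp
    rw [List.mem_map] at hp
    obtain ⟨g, -, rfl⟩ := hp
    exact ⟨hd _, hd _⟩
  have hA : (PySem.List.pyRange 0 (PySem.List.len gifts)).foldl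
        (fun st i =>
          (pvBump2 st.1 (d.getD (PySem.List.pyGetD (PySem.Str.split₀ (PySem.List.pyGetD gifts i "")) 0 "") 0)
            (d.getD (PySem.List.pyGetD (PySem.Str.split₀ (PySem.List.pyGetD gifts i "")) 1 "") 0),
           pvBump (pvBump st.2 (d.getD (PySem.List.pyGetD (PySem.Str.split₀ (PySem.List.pyGetD gifts i "")) 0 "") 0) 1)
             (d.getD (PySem.List.pyGetD (PySem.Str.split₀ (PySem.List.pyGetD gifts i "")) 1 "") 0) (-1)))
        ((PySem.List.pyRange 0 (n : Int)).map (fun _ => PySem.List.pyRepeat [(0 : Int)] (n : Int)),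
         PySem.List.pyRepeat [(0 : Int)] (n : Int))
      = (pvMatOf n (gifts.map (pvKey d)), pvScoreOf n (gifts.map (pvKey d))) := by
    simp only [PySem.List.len_eq]
    rw [PySem.List.foldl_pyRange_zero_pyGetD' gifts ""
        (fun st g =>
          (pvBump2 st.1 (d.getD (PySem.List.pyGetD (PySem.Str.split₀ g) 0 "") 0)
            (d.getD (PySem.List.pyGetD (PySem.Str.split₀ g) 1 "") 0),
           pvBump (pvBump st.2 (d.getD (PySem.List.pyGetD (PySem.Str.split₀ g) 0 "") 0) 1)
             (d.getD (PySem.List.pyGetD (PySem.Str.split₀ g) 1 "") 0) (-1))),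
      PySem.List.foldl_prod_mk
        (f := fun m g => pvBump2 m (d.getD (PySem.List.pyGetD (PySem.Str.split₀ g) 0 "") 0)
          (d.getD (PySem.List.pyGetD (PySem.Str.split₀ g) 1 "") 0))
        (g := fun sc g => pvBump (pvBump sc (d.getD (PySem.List.pyGetD (PySem.Str.split₀ g) 0 "") 0) 1)
          (d.getD (PySem.List.pyGetD (PySem.Str.split₀ g) 1 "") 0) (-1))]
    rw [pvMatOf, pvScoreOf, List.foldl_map, List.foldl_map]
    rfl
  have hB : gifts.foldl
        (fun st gift =>
          (st.1.insert (d.getD (PySem.List.pyGetD (PySem.Str.split₀ gift) 0 "") 0,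
                        d.getD (PySem.List.pyGetD (PySem.Str.split₀ gift) 1 "") 0)
             (st.1.getD (d.getD (PySem.List.pyGetD (PySem.Str.split₀ gift) 0 "") 0,
                         d.getD (PySem.List.pyGetD (PySem.Str.split₀ gift) 1 "") 0) 0 + 1),
           pvBump (pvBump st.2 (d.getD (PySem.List.pyGetD (PySem.Str.split₀ gift) 0 "") 0) 1)
             (d.getD (PySem.List.pyGetD (PySem.Str.split₀ gift) 1 "") 0) (-1)))
        ((PySem.Dict.empty : PySem.Dict (Int × Int) Int), PySem.List.pyRepeat [(0 : Int)] (n : Int))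
      = (PySem.Dict.counter (gifts.map (pvKey d)), pvScoreOf n (gifts.map (pvKey d))) := by
    rw [PySem.List.foldl_prod_mk
        (f := fun (dd : PySem.Dict (Int × Int) Int) (g : String) =>
          dd.insert (d.getD (PySem.List.pyGetD (PySem.Str.split₀ g) 0 "") 0,
                     d.getD (PySem.List.pyGetD (PySem.Str.split₀ g) 1 "") 0)
            (dd.getD (d.getD (PySem.List.pyGetD (PySem.Str.split₀ g) 0 "") 0,
                      d.getD (PySem.List.pyGetD (PySem.Str.split₀ g) 1 "") 0) 0 + 1))
        (g := fun sc g => pvBump (pvBump sc (d.getD (PySem.List.pyGetD (PySem.Str.split₀ g) 0 "") 0) 1)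
          (d.getD (PySem.List.pyGetD (PySem.Str.split₀ g) 1 "") 0) (-1))]
    rw [← PySem.Dict.foldl_insert_getD_add_one_eq_counter (gifts.map (pvKey d)),
      pvScoreOf, List.foldl_map, List.foldl_map]
    rfl
  rw [hA, hB]
  exact congrArg (fun l => (PySem.List.max? l (fun y => y)).getD 0)
    (pvCrux n (gifts.map (pvKey d)) hK)

-- ===== VERDICT (by name: the statement is the Claim_ definition above) =====
theorem solution_spec : Claim_equal_solution := by
  intro friends gifts _hdom hpre
  unfold Spec_solution solution solution_alt
  rw [pvIdx_eq]
  exact pvMain2 gifts friends.length _ (pvIdx_val friends hpre.1)
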